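-- pv_equiv track=rewrite | github.com/daniel-reich/turbo-robot | di7ZjxgvLgz72PvCS_13.py | validate_swaps
-- ===== SOURCE A (Python) =====
-- def validate_swaps(lst, txt):
--   results = []
--   for word in lst:
--     if len(word) != len(txt) or sorted(word) != sorted(txt):
--       results.append(999)
--       continue
--     mismatches = 0
--     for char1, char2 in zip(word, txt):
--       if char1 != char2:
--         mismatches += 1
--     results.append(mismatches)
--
--   return [result <= 2 for result in results]
-- ===== SOURCE B (Python) =====
-- def validate_swaps(lst, txt):
--     n = len(txt)
--
--     def ok(word):
--         if len(word) != n: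
--             return False
--         mismatches = 0
--         delta = {}
--         for c1, c2 in zip(word, txt):
--             if c1 != c2:
--                 mismatches += 1
--             delta[c1] = delta.get(c1, 0) + 1
--             delta[c2] = delta.get(c2, 0) - 1
--         return mismatches <= 2 and all(v == 0 for v in delta.values())
--
--     return [ok(word) for word in lst]
-- ===== Notes on version B (the rewrite author's own statement) =====
-- stated objective: alternative
-- what changed: Replaces the sorted()-based anagram test and the 999 sentinel list with a single pass per word over zip(word, txt) that maintains a mismatch counter and a character frequency-delta dict, emitting each boolean directly.
import Mathlib
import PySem

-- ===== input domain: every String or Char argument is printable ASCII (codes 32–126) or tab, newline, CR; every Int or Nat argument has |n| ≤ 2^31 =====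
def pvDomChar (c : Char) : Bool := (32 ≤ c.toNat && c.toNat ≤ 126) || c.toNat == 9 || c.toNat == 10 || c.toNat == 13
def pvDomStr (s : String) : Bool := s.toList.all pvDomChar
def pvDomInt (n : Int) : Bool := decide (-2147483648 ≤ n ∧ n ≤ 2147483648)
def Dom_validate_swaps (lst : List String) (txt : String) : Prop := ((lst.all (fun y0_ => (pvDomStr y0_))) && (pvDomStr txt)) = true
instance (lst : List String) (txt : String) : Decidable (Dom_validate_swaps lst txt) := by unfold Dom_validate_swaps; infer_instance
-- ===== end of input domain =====

-- B drops the sorted()-based anagram test and the 999 sentinel: one pass per word keeps a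
-- mismatch counter and a character frequency-delta dict (objective: alternative algorithm, same measured cost).


-- ===== PORT A =====
def validate_swaps (lst : List String) (txt : String) : List Bool :=
  let results : List Int := lst.foldl (fun results word =>
    if word.toList.length ≠ txt.toList.length ∨
       PySem.List.sorted word.toList (fun x => x) false ≠ PySem.List.sorted txt.toList (fun x => x) false then
      results ++ [999]
    else
      results ++ [(word.toList.zip txt.toList).foldl
        (fun mismatches p => if p.1 ≠ p.2 then mismatches + 1 else mismatches) (0 : Int)]) []
  results.map (fun result => decide (result ≤ 2))

-- ===== PORT B =====
-- delta[c1] = delta.get(c1, 0) + 1 ; delta[c2] = delta.get(c2, 0) - 1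
def pvDeltaStep (d : PySem.Dict Char Int) (p : Char × Char) : PySem.Dict Char Int :=
  let d1 := d.insert p.1 (d.getD p.1 0 + 1)
  d1.insert p.2 (d1.getD p.2 0 - 1)

def pvOk (txt : String) (word : String) : Bool :=
  if word.toList.length ≠ txt.toList.length then false
  else
    let st := (word.toList.zip txt.toList).foldl
      (fun (s : Int × PySem.Dict Char Int) p =>
        (if p.1 ≠ p.2 then s.1 + 1 else s.1, pvDeltaStep s.2 p))
      ((0 : Int), PySem.Dict.empty)
    decide (st.1 ≤ 2) && st.2.values.all (fun v => v == 0)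

def validate_swaps_alt (lst : List String) (txt : String) : List Bool :=
  lst.map (pvOk txt)

-- ===== PRECONDITION & SPEC =====
def Spec_validate_swaps (lst : List String) (txt : String) (out : List Bool) : Prop := out = validate_swaps_alt lst txt
instance (lst : List String) (txt : String) (out : List Bool) : Decidable (Spec_validate_swaps lst txt out) := by unfold Spec_validate_swaps; infer_instance

-- ===== CLAIM (what is proved, stated in full; the proofs are below) =====
def Claim_equal_validate_swaps : Prop := ∀ (lst : List String) (txt : String), Dom_validate_swaps lst txt → Spec_validate_swaps lst txt (validate_swaps lst txt)

-- ===== LEMMAS AND PROOFS =====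

-- getD of the delta fold: word-count minus txt-count of the prefix processed
theorem pv_delta_getD (l : List (Char × Char)) (d : PySem.Dict Char Int) (v : Char) :
    (l.foldl pvDeltaStep d).getD v 0
      = d.getD v 0 + ((l.map Prod.fst).count v : Int) - ((l.map Prod.snd).count v : Int) := by
  induction l generalizing d with
  | nil => simp
  | cons p l ih =>
    simp only [List.foldl_cons, ih, List.map_cons, List.count_cons]
    simp only [pvDeltaStep, PySem.Dict.getD_insert]
    split_ifs <;> simp_all <;> ring

theorem pv_delta_nodup (l : List (Char × Char)) (d : PySem.Dict Char Int)
    (h : d.keys.Nodup) : (l.foldl pvDeltaStep d).keys.Nodup := by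
  induction l generalizing d with
  | nil => exact h
  | cons p l ih =>
    exact ih _ (PySem.Dict.nodup_keys_insert _ _ _ (PySem.Dict.nodup_keys_insert _ _ _ h))

theorem pv_allzero_iff (l : List (Char × Char)) :
    ((l.foldl pvDeltaStep PySem.Dict.empty).values.all (fun v => v == 0) = true)
      ↔ ∀ v : Char, (l.map Prod.fst).count v = (l.map Prod.snd).count v := by
  have hnd : (l.foldl pvDeltaStep PySem.Dict.empty).keys.Nodup :=
    pv_delta_nodup l _ (by simp)
  rw [PySem.Dict.values_eq_map_keys _ hnd 0]
  simp only [List.all_eq_true, List.mem_map, beq_iff_eq]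
  constructor
  · intro h v
    by_cases hv : v ∈ (l.foldl pvDeltaStep PySem.Dict.empty).keys
    · have := h _ ⟨v, hv, rfl⟩
      have hg := pv_delta_getD l PySem.Dict.empty v
      simp [PySem.Dict.getD_empty] at hg
      omega
    · have hz : (l.foldl pvDeltaStep PySem.Dict.empty).getD v 0 = 0 := by
        rw [PySem.Dict.getD_eq_get?_getD, (PySem.Dict.get?_eq_none_iff_not_mem_keys _ _).mpr hv]
        rfl
      have hg := pv_delta_getD l PySem.Dict.empty v
      simp [PySem.Dict.getD_empty] at hg
      omega
  · rintro h x ⟨v, hv, rfl⟩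
    have hg := pv_delta_getD l PySem.Dict.empty v
    simp [PySem.Dict.getD_empty] at hg
    have := h v
    omega

-- for equal-length strings, the anagram test of A equals the all-deltas-zero test of B
theorem pv_anagram_iff (w t : List Char) (hlen : w.length = t.length) :
    (PySem.List.sorted w (fun x => x) false = PySem.List.sorted t (fun x => x) false)
      ↔ (((w.zip t).foldl pvDeltaStep PySem.Dict.empty).values.all (fun v => v == 0) = true) := by
  rw [PySem.List.sorted_id_eq_sorted_id_iff_perm, pv_allzero_iff, List.perm_iff_count]
  rw [show List.map Prod.fst (w.zip t) = w from List.map_fst_zip (le_of_eq hlen),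
      show List.map Prod.snd (w.zip t) = t from List.map_snd_zip (le_of_eq hlen.symm)]

-- pointwise: A's entry for a word equals B's
theorem pv_entry (txt word : String) :
    decide ((if word.toList.length ≠ txt.toList.length ∨
        PySem.List.sorted word.toList (fun x => x) false ≠ PySem.List.sorted txt.toList (fun x => x) false then
        (999 : Int)
      else
        (word.toList.zip txt.toList).foldl
          (fun mismatches p => if p.1 ≠ p.2 then mismatches + 1 else mismatches) (0 : Int)) ≤ 2)
      = pvOk txt word := by
  unfold pvOk
  rw [PySem.List.foldl_prod_mk
    (f := fun mismatches (p : Char × Char) => if p.1 ≠ p.2 then mismatches + 1 else mismatches)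
    (g := fun d p => pvDeltaStep d p)]
  by_cases hlen : word.toList.length = txt.toList.length
  · by_cases hs : PySem.List.sorted word.toList (fun x => x) false
        = PySem.List.sorted txt.toList (fun x => x) false
    · have hz := (pv_anagram_iff word.toList txt.toList hlen).mp hs
      simp [hlen, hs, hz]
    · have hz : ¬ (((word.toList.zip txt.toList).foldl pvDeltaStep PySem.Dict.empty).values.all
          (fun v => v == 0) = true) := fun h => hs ((pv_anagram_iff _ _ hlen).mpr h)
      simp [hlen, hs, Bool.eq_false_iff.mpr hz]
  · have hlen' : ¬ word.length = txt.length := by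
      simpa [String.length_toList] using hlen
    simp [hlen']

-- ===== VERDICT (by name: the statement is the Claim_ definition above) =====
theorem validate_swaps_spec : Claim_equal_validate_swaps := by
  intro lst txt _
  unfold Spec_validate_swaps validate_swaps validate_swaps_alt
  have hstep : (fun (results : List Int) (word : String) =>
      if word.toList.length ≠ txt.toList.length ∨
         PySem.List.sorted word.toList (fun x => x) false ≠ PySem.List.sorted txt.toList (fun x => x) false then
        results ++ [999]
      else
        results ++ [(word.toList.zip txt.toList).foldl
          (fun mismatches p => if p.1 ≠ p.2 then mismatches + 1 else mismatches) (0 : Int)])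
    = (fun results word => results ++
        [if word.toList.length ≠ txt.toList.length ∨
            PySem.List.sorted word.toList (fun x => x) false ≠ PySem.List.sorted txt.toList (fun x => x) false then
           (999 : Int)
         else (word.toList.zip txt.toList).foldl
           (fun mismatches p => if p.1 ≠ p.2 then mismatches + 1 else mismatches) (0 : Int)]) := by
    funext results word; split <;> rfl
  simp only [hstep, PySem.List.foldl_append_singleton_eq_map, List.nil_append, List.map_map]
  exact List.map_congr_left fun word _ => pv_entry txt word
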